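-- pv_equiv track=rewrite | github.com/bncolorado/adsoScansionSystem | analysis/modules/AnalizadorSinalefas/PorReglas/sinalefaReglas.py | enmedioConjuncionAtonaIzq
-- ===== SOURCE A (Python) =====
-- def enmedioConjuncionAtonaIzq(verso, sinlalefPorResolver): #Une la conjunción con la palabra de la izquierda
--         indice = int()
--         salida = ''
--         for item in verso:
--             if item == ' ':
--                 if verso[indice-1] in u'aeiouh' and verso[indice+1] in u'yaeouh' and verso[indice+2] == ' ':
--                     if sinlalefPorResolver > 0:
--                         salida += u'_'
--                         sinlalefPorResolver = sinlalefPorResolver-1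
--                     else:
--                         salida += item
--                 else:
--                     salida += item
--             else:
--                 salida += item
--             indice += 1
--         return salida, sinlalefPorResolver
-- ===== SOURCE B (Python) =====
-- def enmedioConjuncionAtonaIzq(verso, sinlalefPorResolver):
--     # Two-pass re-implementation: (1) collect the indices of every space that
--     # satisfies the merge condition (same expression, same short-circuit order),
--     # (2) take the first max(sinlalefPorResolver, 0) of them and rebuild the
--     # string by position, replacing exactly those indices with '_'.
--     matches = [i for i in range(len(verso))
--                if verso[i] == ' '
--                and verso[i - 1] in u'aeiouh'
--                and verso[i + 1] in u'yaeouh'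
--                and verso[i + 2] == ' ']
--     chosen = matches[:max(sinlalefPorResolver, 0)]
--     salida = ''.join(u'_' if i in chosen else ch for i, ch in enumerate(verso))
--     return salida, sinlalefPorResolver - len(chosen)
-- ===== Notes on version B (the rewrite author's own statement) =====
-- stated objective: alternative
-- what changed: A's single stateful fold (index counter + string accumulator + in-loop counter decrement) is replaced by two passes: collect all matching space indices, slice off the first max(counter,0) of them, then rebuild the string positionally with join.
import Mathlib
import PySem

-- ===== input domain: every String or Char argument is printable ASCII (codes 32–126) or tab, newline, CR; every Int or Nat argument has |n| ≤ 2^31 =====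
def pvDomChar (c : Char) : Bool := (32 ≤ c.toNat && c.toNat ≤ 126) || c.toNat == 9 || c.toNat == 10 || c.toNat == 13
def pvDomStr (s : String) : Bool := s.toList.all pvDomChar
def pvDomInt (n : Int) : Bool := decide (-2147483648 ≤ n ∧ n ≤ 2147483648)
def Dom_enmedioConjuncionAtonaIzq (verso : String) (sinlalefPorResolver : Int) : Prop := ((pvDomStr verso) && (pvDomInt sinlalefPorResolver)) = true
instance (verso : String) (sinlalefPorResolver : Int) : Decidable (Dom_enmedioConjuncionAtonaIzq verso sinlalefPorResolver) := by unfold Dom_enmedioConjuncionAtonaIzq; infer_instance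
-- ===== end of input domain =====

-- B replaces A's single stateful fold by an index-collection pass plus a positional rebuild (objective: alternative decomposition).

-- ===== PORT A =====
-- Shared helper: the Python expression
--   verso[indice-1] in u'aeiouh' and verso[indice+1] in u'yaeouh' and verso[indice+2] == ' '
-- with the same short-circuit order; `none` from pyGet? is where Python raises
-- IndexError (those inputs are excluded by Pre_; the helper returns false there).
def pvCond (cs : List Char) (i : Int) : Bool :=
  match PySem.List.pyGet? cs (i - 1) with
  | none => false
  | some c =>
    if c ∈ ['a','e','i','o','u','h'] then
      match PySem.List.pyGet? cs (i + 1) with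
      | none => false
      | some c1 =>
        if c1 ∈ ['y','a','e','o','u','h'] then
          PySem.List.pyGet? cs (i + 2) == some ' '
        else false
    else false

-- the body of A's `for item in verso` loop; state = (indice, salida, sinlalefPorResolver)
def pvStepA (cs : List Char) (st : Int × List Char × Int) (item : Char) : Int × List Char × Int :=
  let (indice, salida, k) := st
  if item = ' ' then
    if pvCond cs indice then
      if k > 0 then (indice + 1, salida ++ ['_'], k - 1)
      else (indice + 1, salida ++ [item], k)
    else (indice + 1, salida ++ [item], k)
  else (indice + 1, salida ++ [item], k)

def enmedioConjuncionAtonaIzq (verso : String) (sinlalefPorResolver : Int) : String × Int :=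
  let cs := verso.toList
  let r := cs.foldl (pvStepA cs) (0, [], sinlalefPorResolver)
  (String.mk r.2.1, r.2.2)

-- ===== PORT B =====
def enmedioConjuncionAtonaIzq_alt (verso : String) (sinlalefPorResolver : Int) : String × Int :=
  let cs := verso.toList
  -- matches = [i for i in range(len(verso)) if verso[i] == ' ' and <pvCond>]
  let ms := (PySem.List.pyRange 0 (cs.length : Int) 1).filter
    (fun i => (PySem.List.pyGet? cs i == some ' ') && pvCond cs i)
  -- chosen = matches[:max(sinlalefPorResolver, 0)]   (Int.toNat is max(·,0))
  let chosen := ms.take sinlalefPorResolver.toNat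
  -- salida = ''.join('_' if i in chosen else ch for i, ch in enumerate(verso))
  let salida := (PySem.List.enumerate cs).map (fun p => if p.1 ∈ chosen then '_' else p.2)
  (String.mk salida, sinlalefPorResolver - chosen.length)

-- ===== PRECONDITION & SPEC =====
-- Pre_ excludes exactly the inputs on which Python A raises IndexError: a space
-- at position i whose left neighbour is in 'aeiouh' while i+1 is out of range,
-- or whose right neighbour is in 'yaeouh' while i+2 is out of range.
def Pre_enmedioConjuncionAtonaIzq (verso : String) (sinlalefPorResolver : Int) : Prop :=
  let cs := verso.toList
  ∀ i : Nat, i < cs.length → cs[i]? = some ' ' →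
    ((PySem.List.pyGet? cs ((i : Int) - 1)).any (fun c => c ∈ ['a','e','i','o','u','h']) →
      (i + 1 < cs.length ∧
        ((cs[i+1]?).any (fun c => c ∈ ['y','a','e','o','u','h']) → i + 2 < cs.length)))
instance (verso : String) (sinlalefPorResolver : Int) : Decidable (Pre_enmedioConjuncionAtonaIzq verso sinlalefPorResolver) := by unfold Pre_enmedioConjuncionAtonaIzq; infer_instance

def pvWitness_enmedioConjuncionAtonaIzq : String × Int := ("la a ma", 1)

def Spec_enmedioConjuncionAtonaIzq (verso : String) (sinlalefPorResolver : Int) (out : String × Int) : Prop := out = enmedioConjuncionAtonaIzq_alt verso sinlalefPorResolver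
instance (verso : String) (sinlalefPorResolver : Int) (out : String × Int) : Decidable (Spec_enmedioConjuncionAtonaIzq verso sinlalefPorResolver out) := by unfold Spec_enmedioConjuncionAtonaIzq; infer_instance

-- ===== CLAIM (what is proved, stated in full; the proofs are below) =====
def Claim_equal_enmedioConjuncionAtonaIzq : Prop := ∀ (verso : String) (sinlalefPorResolver : Int), Dom_enmedioConjuncionAtonaIzq verso sinlalefPorResolver → Pre_enmedioConjuncionAtonaIzq verso sinlalefPorResolver → Spec_enmedioConjuncionAtonaIzq verso sinlalefPorResolver (enmedioConjuncionAtonaIzq verso sinlalefPorResolver)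

-- ===== LEMMAS AND PROOFS =====

-- B's filter predicate, named for the proofs
def pvPb (cs : List Char) (i : Int) : Bool :=
  (PySem.List.pyGet? cs i == some ' ') && pvCond cs i

-- Common recursive reference: processes the suffix l of cs starting at index j
-- with budget k, returning the produced characters and the final budget.
def pvGo (cs : List Char) : List Char → Int → Int → List Char × Int
  | [], _, k => ([], k)
  | c :: t, j, k =>
    if c = ' ' ∧ pvCond cs j ∧ k > 0 then
      ('_' :: (pvGo cs t (j + 1) (k - 1)).1, (pvGo cs t (j + 1) (k - 1)).2)
    else
      (c :: (pvGo cs t (j + 1) k).1, (pvGo cs t (j + 1) k).2)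

theorem pvFoldA (cs : List Char) :
    ∀ (l : List Char) (j : Int) (out : List Char) (k : Int),
      l.foldl (pvStepA cs) (j, out, k) =
        (j + l.length, out ++ (pvGo cs l j k).1, (pvGo cs l j k).2) := by
  intro l
  induction l with
  | nil => intro j out k; simp [pvGo]
  | cons c t ih =>
    intro j out k
    simp only [List.foldl_cons, pvStepA, pvGo]
    by_cases hc : c = ' '
    · by_cases hp : pvCond cs j = true
      · by_cases hk : k > 0
        · simp [hc, hp, hk, ih, List.length_cons]; omega
        · simp [hc, hp, hk, ih, List.length_cons]; omega
      · simp [hc, hp, ih, List.length_cons]; omega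
    · simp [hc, ih, List.length_cons]; omega

theorem pvGo_spec (cs : List Char) :
    ∀ (l : List Char) (j : Nat) (k : Int), cs.drop j = l →
      pvGo cs l (j : Int) k =
        (((PySem.List.pyRange (j : Int) (cs.length : Int) 1).map
            (fun i => if i ∈ ((PySem.List.pyRange (j : Int) (cs.length : Int) 1).filter (pvPb cs)).take k.toNat then '_' else PySem.List.pyGetD cs i ' ')),
         k - (((PySem.List.pyRange (j : Int) (cs.length : Int) 1).filter (pvPb cs)).take k.toNat).length) := by
  intro l
  induction l with
  | nil =>
    intro j k hd
    have hle : cs.length ≤ j := by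
      have := List.drop_eq_nil_iff.mp hd; omega
    rw [PySem.List.pyRange_one_eq_nil (by exact_mod_cast hle)]
    simp [pvGo]
  | cons c t ih =>
    intro j k hd
    have hj : j < cs.length := by
      by_contra h
      rw [List.drop_eq_nil_iff.mpr (by omega)] at hd; simp at hd
    have hget : cs[j]? = some c := by
      have h : (List.drop j cs)[0]? = cs[j + 0]? := List.getElem?_drop
      rw [hd] at h; simpa using h.symm
    have hdrop : List.drop (j + 1) cs = t := by
      have h2 : List.drop 1 (List.drop j cs) = t := by rw [hd]; simp
      rw [List.drop_drop] at h2
      simpa [Nat.add_comm] using h2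
    have hrange : PySem.List.pyRange (j : Int) (cs.length : Int) 1
        = (j : Int) :: PySem.List.pyRange ((j : Int) + 1) (cs.length : Int) 1 :=
      PySem.List.pyRange_one_cons (by exact_mod_cast hj)
    have hgetI : PySem.List.pyGet? cs (j : Int) = some c := by
      rw [PySem.List.pyGet?_natCast]; exact hget
    have hPb : pvPb cs (j : Int) = ((c == ' ') && pvCond cs (j : Int)) := by
      simp [pvPb, hgetI]
    have hgetD : PySem.List.pyGetD cs (j : Int) ' ' = c := by
      simp [PySem.List.pyGetD, hgetI]
    have hcast : ((j : Int) + 1) = ((j + 1 : Nat) : Int) := by push_cast; ring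
    have hgt : ∀ (m : Nat) (i : Int),
        i ∈ ((PySem.List.pyRange ((j + 1 : Nat) : Int) (cs.length : Int) 1).filter (pvPb cs)).take m →
        (j : Int) < i := by
      intro m i hi
      have h3 := PySem.List.mem_pyRange_one.mp (List.mem_of_mem_filter (List.mem_of_mem_take hi))
      have h4 : ((j : Int)) + 1 ≤ i := by exact_mod_cast h3.1
      omega
    rw [hrange]
    simp only [pvGo, List.filter_cons, hPb, hcast]
    by_cases hc : c = ' '
    · by_cases hp : pvCond cs ((j : Int)) = true
      · have hb : ((c == ' ') && pvCond cs ((j : Int))) = true := by simp [hc, hp]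
        rw [if_pos hb]
        by_cases hk : k > 0
        · rw [if_pos ⟨hc, hp, hk⟩]
          rw [ih (j + 1) (k - 1) hdrop]
          rw [show k.toNat = (k - 1).toNat + 1 by omega, List.take_succ_cons]
          simp only [Prod.mk.injEq, List.map_cons]
          constructor
          · rw [if_pos (List.mem_cons_self)]
            refine congrArg (List.cons '_') ?_
            apply List.map_congr_left
            intro i hi
            have h4 := PySem.List.mem_pyRange_one.mp hi
            have hne : ¬ (i = (j : Int)) := by
              have h5 : ((j : Int)) + 1 ≤ i := by
                have := h4.1; rw [← hcast] at this; exact this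
              omega
            simp [hne]
          · simp only [List.length_cons]; push_cast; ring
        · rw [if_neg (fun h => hk h.2.2)]
          rw [ih (j + 1) k hdrop]
          rw [show k.toNat = 0 by omega]
          simp only [List.take_zero, Prod.mk.injEq, List.map_cons, List.not_mem_nil,
            if_false, List.length_nil]
          exact ⟨by rw [hgetD], by simp⟩
      · have hb : ((c == ' ') && pvCond cs ((j : Int))) = false := by simp [hp]
        rw [if_neg (fun h => hp h.2.1)]
        rw [if_neg (show ¬ ((c == ' ' && pvCond cs ((j : Int))) = true) by simp [hb])]
        rw [ih (j + 1) k hdrop]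
        simp only [Prod.mk.injEq, List.map_cons]
        refine ⟨?_, trivial⟩
        rw [if_neg (fun h => absurd (hgt _ _ h) (lt_irrefl _)), hgetD]
    · have hb : ((c == ' ') && pvCond cs ((j : Int))) = false := by simp [hc]
      rw [if_neg (fun h => hc h.1)]
      rw [if_neg (show ¬ ((c == ' ' && pvCond cs ((j : Int))) = true) by simp [hb])]
      rw [ih (j + 1) k hdrop]
      simp only [Prod.mk.injEq, List.map_cons]
      refine ⟨?_, trivial⟩
      rw [if_neg (fun h => absurd (hgt _ _ h) (lt_irrefl _)), hgetD]

-- rebuild of B's output as a map over the index range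
theorem pvEnumerate_map (cs : List Char) (chosen : List Int) :
    (PySem.List.enumerate cs).map (fun p => if p.1 ∈ chosen then '_' else p.2)
      = (PySem.List.pyRange 0 (cs.length : Int) 1).map
          (fun i => if i ∈ chosen then '_' else PySem.List.pyGetD cs i ' ') := by
  rw [PySem.List.enumerate_eq_map_pyRange cs ' ']
  rw [List.map_map]
  rfl

-- ===== VERDICT (by name: the statement is the Claim_ definition above) =====
theorem enmedioConjuncionAtonaIzq_spec : Claim_equal_enmedioConjuncionAtonaIzq := by
  intro verso k _ _
  unfold Spec_enmedioConjuncionAtonaIzq enmedioConjuncionAtonaIzq enmedioConjuncionAtonaIzq_alt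
  simp only []
  rw [pvFoldA verso.toList verso.toList 0 [] k]
  have h0 := pvGo_spec verso.toList verso.toList 0 k (by simp)
  simp only [Nat.cast_zero] at h0
  rw [h0]
  rw [pvEnumerate_map]
  simp only [List.nil_append]
  rfl
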